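-- pv_equiv track=rewrite | github.com/lgili/MagnaDesign | scripts/import_powder_xlsx.py | _infer_shape
-- ===== SOURCE A (Python) =====
-- def _infer_shape(part_number: str, fallback: str = "T") -> str:
--     """Infer shape family from a Magnetics-style part number.
--
--     Magnetics SKUs follow patterns like ``0058083A2`` (toroide),
--     ``EE 24/24/8`` (E-pair), etc. When the part starts with a
--     canonical IEC family prefix, use it; otherwise return the
--     fallback (most powder cores are toroides).
--     """
--     pn = part_number.strip().upper()
--     for prefix in (
--         "ETD",
--         "EFD",
--         "EER",
--         "EEL",
--         "EE",
--         "EL",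
--         "EI",
--         "ER",
--         "EQ",
--         "EP",
--         "PQ",
--         "RM",
--         "PM",
--         "PH",
--         "PT",
--         "EC",
--         "UI",
--         "UR",
--         "UT",
--         "U",
--         "P",
--         "T",
--         "E",
--     ):
--         if pn.startswith(prefix + " ") or pn.startswith(prefix + "-"):
--             return prefix
--     return fallback
-- ===== SOURCE B (Python) =====
-- _PREFIXES = frozenset((
--     "ETD", "EFD", "EER", "EEL", "EE", "EL", "EI", "ER", "EQ", "EP",
--     "PQ", "RM", "PM", "PH", "PT", "EC", "UI", "UR", "UT", "U", "P", "T", "E",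
-- ))
--
--
-- def _infer_shape(part_number: str, fallback: str = "T") -> str:
--     """Loop-free: locate the first ' ' or '-' with str.find, slice the leading
--     token off, and decide with one frozenset membership test."""
--     pn = part_number.strip().upper()
--     i = pn.find(" ")
--     j = pn.find("-")
--     if i < 0:
--         cut = j
--     elif j < 0:
--         cut = i
--     else:
--         cut = min(i, j)
--     if cut < 0:
--         return fallback
--     head = pn[:cut]
--     return head if head in _PREFIXES else fallback
-- ===== Notes on version B (the rewrite author's own statement) =====
-- stated objective: simpler
-- what changed: Replaced A's ordered loop of 23 repeated startswith tests by a loop-free parse: str.find locates the first ' '/'-' separator, a slice extracts the leading token, and one frozenset membership test decides.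
import Mathlib
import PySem

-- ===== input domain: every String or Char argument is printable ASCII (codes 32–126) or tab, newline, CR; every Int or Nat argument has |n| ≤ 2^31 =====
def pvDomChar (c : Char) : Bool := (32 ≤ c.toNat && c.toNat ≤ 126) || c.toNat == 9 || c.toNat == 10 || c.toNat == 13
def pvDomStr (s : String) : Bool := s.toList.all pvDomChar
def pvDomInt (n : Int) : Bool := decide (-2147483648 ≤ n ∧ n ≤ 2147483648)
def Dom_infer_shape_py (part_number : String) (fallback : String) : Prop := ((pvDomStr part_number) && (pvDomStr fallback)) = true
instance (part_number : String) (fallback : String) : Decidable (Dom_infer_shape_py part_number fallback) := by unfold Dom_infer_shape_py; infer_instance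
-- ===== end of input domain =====

-- B replaces A's loop of 23 repeated startswith tests by a loop-free parse:
-- str.find locates the first ' '/'-', a slice extracts the leading token, one
-- set-membership test decides (objective: simpler).


-- ===== PORT A =====
-- the prefix tuple of A, in A's order
def pvPrefixes : List String :=
  ["ETD", "EFD", "EER", "EEL", "EE", "EL", "EI", "ER", "EQ", "EP",
   "PQ", "RM", "PM", "PH", "PT", "EC", "UI", "UR", "UT", "U", "P", "T", "E"]

-- the 'for prefix in (…): if pn.startswith(prefix + " ") or pn.startswith(prefix + "-"): return prefix'
-- loop; string concatenation 'prefix + " "' is list append on the list side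
def pvLoopA (pn : List Char) (fallback : String) : List String → String
  | [] => fallback
  | pfx :: rest =>
    if PySem.Chars.startswith pn (pfx.toList ++ [' ']) || PySem.Chars.startswith pn (pfx.toList ++ ['-'])
    then pfx
    else pvLoopA pn fallback rest

def infer_shape_py (part_number : String) (fallback : String) : String :=
  pvLoopA (PySem.Chars.upper (PySem.Chars.strip part_number.toList)) fallback pvPrefixes

-- ===== PORT B =====
-- the frozenset _PREFIXES of Source B
def pvPrefixSet : PySem.Set String :=
  PySem.Set.ofList
    ["ETD", "EFD", "EER", "EEL", "EE", "EL", "EI", "ER", "EQ", "EP",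
     "PQ", "RM", "PM", "PH", "PT", "EC", "UI", "UR", "UT", "U", "P", "T", "E"]

-- Source B, line for line: find both separators, combine into cut, slice, one lookup
def infer_shape_py_alt (part_number : String) (fallback : String) : String :=
  let pn := PySem.Chars.upper (PySem.Chars.strip part_number.toList)
  let i := PySem.Chars.find pn [' ']
  let j := PySem.Chars.find pn ['-']
  let cut := if i < 0 then j else if j < 0 then i else min i j
  if cut < 0 then fallback
  else
    let head := String.ofList (PySem.List.slice pn none (some cut))
    if PySem.Set.contains pvPrefixSet head then head else fallback

-- ===== PRECONDITION & SPEC =====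
def Spec_infer_shape_py (part_number : String) (fallback : String) (out : String) : Prop := out = infer_shape_py_alt part_number fallback
instance (part_number : String) (fallback : String) (out : String) : Decidable (Spec_infer_shape_py part_number fallback out) := by unfold Spec_infer_shape_py; infer_instance

-- ===== CLAIM (what is proved, stated in full; the proofs are below) =====
def Claim_equal_infer_shape_py : Prop := ∀ (part_number : String) (fallback : String), Dom_infer_shape_py part_number fallback → Spec_infer_shape_py part_number fallback (infer_shape_py part_number fallback)

-- ===== LEMMAS AND PROOFS =====

-- characters that are NOT the token separator ' '/'-'
def pvNonSep (c : Char) : Bool := !(c == ' ' || c == '-')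

-- "pn starts with q followed by the separator c" ↔ "the leading nonsep token is exactly q
-- and the first separator is c" (for q free of separators)
lemma pv_prefix_sep_iff (q : List Char) (c : Char) (hq : q.all pvNonSep = true)
    (hc : pvNonSep c = false) (s : List Char) :
    q ++ [c] <+: s ↔ (s.takeWhile pvNonSep = q ∧ (s.dropWhile pvNonSep).head? = some c) := by
  induction q generalizing s with
  | nil =>
    cases s with
    | nil => simp
    | cons a t =>
      rw [List.takeWhile_cons, List.dropWhile_cons]
      simp only [List.nil_append, List.cons_prefix_cons, List.nil_prefix, and_true]
      constructor
      · rintro rfl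
        simp [hc]
      · intro ⟨h1, h2⟩
        by_cases hp : pvNonSep a
        · simp [hp] at h1
        · simp [hp] at h2 ⊢
          exact h2.symm
  | cons b q' ih =>
    have hb : pvNonSep b = true := by simp [List.all_cons] at hq; simpa using hq.1
    have hq' : q'.all pvNonSep = true := by simp [List.all_cons] at hq; simpa using hq.2
    cases s with
    | nil => simp
    | cons a t =>
      rw [List.takeWhile_cons, List.dropWhile_cons]
      simp only [List.cons_append, List.cons_prefix_cons]
      by_cases hp : pvNonSep a
      · simp only [hp, if_pos]
        rw [ih hq' t]
        constructor
        · rintro ⟨rfl, h1, h2⟩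
          exact ⟨by rw [h1], h2⟩
        · rintro ⟨h1, h2⟩
          have h1' : a = b ∧ t.takeWhile pvNonSep = q' := by
            constructor
            · exact (List.cons.injEq _ _ _ _ ▸ h1).1
            · exact (List.cons.injEq _ _ _ _ ▸ h1).2
          exact ⟨h1'.1.symm, h1'.2, h2⟩
      · simp only [hp, Bool.false_eq_true, if_false]
        constructor
        · rintro ⟨rfl, -⟩
          exact absurd hb (by simpa using hp)
        · rintro ⟨h1, -⟩
          simp at h1

-- head of a dropWhile fails the predicate
lemma pv_head?_dropWhile (p : Char → Bool) (l : List Char) (c : Char)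
    (h : (List.dropWhile p l).head? = some c) : p c = false := by
  induction l with
  | nil => simp [List.dropWhile] at h
  | cons a t ih =>
    rw [List.dropWhile_cons] at h
    by_cases hp : p a
    · simp [hp] at h; exact ih h
    · simp [hp] at h; subst h; simpa using hp

-- A's per-prefix condition, rephrased through the leading token
lemma pv_condA_iff (pfx : String) (hq : pfx.toList.all pvNonSep = true) (s : List Char) :
    (PySem.Chars.startswith s (pfx.toList ++ [' ']) || PySem.Chars.startswith s (pfx.toList ++ ['-'])) = true
      ↔ (s.takeWhile pvNonSep = pfx.toList ∧ s.dropWhile pvNonSep ≠ []) := by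
  rw [Bool.or_eq_true, PySem.Chars.startswith_iff, PySem.Chars.startswith_iff,
      pv_prefix_sep_iff _ _ hq (by decide) s, pv_prefix_sep_iff _ _ hq (by decide) s]
  constructor
  · rintro (⟨h1, h2⟩ | ⟨h1, h2⟩) <;> exact ⟨h1, by intro hn; rw [hn] at h2; simp at h2⟩
  · rintro ⟨h1, h2⟩
    obtain ⟨c, hc⟩ : ∃ c, (s.dropWhile pvNonSep).head? = some c := by
      cases hd : s.dropWhile pvNonSep with
      | nil => exact absurd hd h2
      | cons x xs => exact ⟨x, rfl⟩
    have hns := pv_head?_dropWhile pvNonSep s c hc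
    by_cases h' : c = ' '
    · exact Or.inl ⟨h1, h' ▸ hc⟩
    · have h'' : c = '-' := by
        simp [pvNonSep, h'] at hns
        exact hns
      exact Or.inr ⟨h1, h'' ▸ hc⟩

-- collapse of A's ordered scan: it returns the leading token iff the token is one of the
-- prefixes and a separator follows, else the fallback
lemma pv_loopA_spec (s : List Char) (fb : String) (L : List String)
    (hL : ∀ p ∈ L, p.toList.all pvNonSep = true) :
    pvLoopA s fb L =
      if s.dropWhile pvNonSep ≠ [] ∧ String.ofList (s.takeWhile pvNonSep) ∈ L
      then String.ofList (s.takeWhile pvNonSep) else fb := by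
  induction L with
  | nil => simp [pvLoopA]
  | cons p rest ih =>
    have hp := hL p (by simp)
    have hrest : ∀ q ∈ rest, q.toList.all pvNonSep = true := fun q hq => hL q (by simp [hq])
    rw [pvLoopA]
    by_cases hc : (PySem.Chars.startswith s (p.toList ++ [' ']) || PySem.Chars.startswith s (p.toList ++ ['-'])) = true
    · rw [if_pos hc]
      rw [pv_condA_iff p hp s] at hc
      have htok : String.ofList (s.takeWhile pvNonSep) = p := by
        rw [hc.1]; exact String.ofList_eq.mpr rfl
      rw [if_pos ⟨hc.2, by rw [htok]; simp⟩, htok]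
    · rw [if_neg hc, ih hrest]
      rw [pv_condA_iff p hp s] at hc
      by_cases hsep : s.dropWhile pvNonSep ≠ []
      · have hne : String.ofList (s.takeWhile pvNonSep) ≠ p := by
          intro he
          exact hc ⟨by rw [← he, String.toList_ofList], hsep⟩
        simp only [List.mem_cons]
        by_cases hmem : String.ofList (s.takeWhile pvNonSep) ∈ rest
        · rw [if_pos ⟨hsep, hmem⟩, if_pos ⟨hsep, Or.inr hmem⟩]
        · rw [if_neg (by tauto), if_neg (by tauto)]
      · rw [if_neg (by tauto), if_neg (by tauto)]

-- a singleton is a prefix of l iff l's head is that character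
lemma pv_single_prefix (c : Char) (l : List Char) : [c] <+: l ↔ l.head? = some c := by
  cases l with
  | nil => simp
  | cons a t => simp [List.cons_prefix_cons, eq_comm]

-- characters strictly before the first separator are nonsep
lemma pv_get_before (s : List Char) (k : Nat) (hk : k < (s.takeWhile pvNonSep).length) :
    (s.drop k).head? = some (s.takeWhile pvNonSep)[k] ∧ pvNonSep (s.takeWhile pvNonSep)[k] = true := by
  constructor
  · rw [List.head?_drop]
    have hpfx := List.takeWhile_prefix (p := pvNonSep) (l := s)
    rw [List.getElem?_eq_getElem (lt_of_lt_of_le hk hpfx.length_le)]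
    exact congrArg some (hpfx.getElem hk).symm
  · exact List.mem_takeWhile_imp (List.getElem_mem hk)

-- s.drop n, for n the token length, is the dropWhile part
lemma pv_drop_token (s : List Char) :
    s.drop (s.takeWhile pvNonSep).length = s.dropWhile pvNonSep := by
  have h := List.takeWhile_append_dropWhile (p := pvNonSep) (l := s)
  calc s.drop (s.takeWhile pvNonSep).length
      = (s.takeWhile pvNonSep ++ s.dropWhile pvNonSep).drop (s.takeWhile pvNonSep).length := by
        rw [h]
    _ = s.dropWhile pvNonSep := List.drop_left

-- find of the separator standing at the head of the dropWhile part is exactly the token length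
lemma pv_find_at_sep (s : List Char) (c : Char)
    (hc : (s.dropWhile pvNonSep).head? = some c) :
    PySem.Chars.find s [c] = ((s.takeWhile pvNonSep).length : Int) := by
  set n := (s.takeWhile pvNonSep).length with hn
  have hpre : [c] <+: s.drop n := by
    rw [pv_drop_token, pv_single_prefix]; exact hc
  have hinfix : [c] <:+: s := by
    rw [← PySem.Chars.isIn_iff_infix, ← PySem.Chars.exists_prefix_drop_iff_isIn]
    exact ⟨n, hpre⟩
  have hnn : 0 ≤ PySem.Chars.find s [c] := by
    rw [PySem.Chars.find_nonneg_iff]; exact hinfix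
  obtain ⟨hat, hmin⟩ := PySem.Chars.find_spec (s := s) (sub := [c]) hnn
  set m := (PySem.Chars.find s [c]).toNat with hm
  have hcm : ¬ m < n := by
    intro hlt
    obtain ⟨hhead, hns⟩ := pv_get_before s m hlt
    rw [pv_single_prefix] at hat
    rw [hat] at hhead
    have : pvNonSep c = false := by
      have := pv_head?_dropWhile pvNonSep s c hc
      exact this
    injection hhead with he
    rw [← he] at hns
    rw [this] at hns
    exact Bool.false_ne_true hns
  have hcm2 : ¬ n < m := fun hlt => hmin n hlt hpre
  have : m = n := by omega
  omega

-- any occurrence of a separator character is at or after the token length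
lemma pv_find_ge (s : List Char) (c : Char) (hc : pvNonSep c = false)
    (hnn : 0 ≤ PySem.Chars.find s [c]) :
    ((s.takeWhile pvNonSep).length : Int) ≤ PySem.Chars.find s [c] := by
  obtain ⟨hat, _⟩ := PySem.Chars.find_spec (s := s) (sub := [c]) hnn
  set m := (PySem.Chars.find s [c]).toNat with hm
  by_contra hlt
  push Not at hlt
  have hmn : m < (s.takeWhile pvNonSep).length := by omega
  obtain ⟨hhead, hns⟩ := pv_get_before s m hmn
  rw [pv_single_prefix] at hat
  rw [hat] at hhead
  injection hhead with he
  rw [← he, hc] at hns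
  exact Bool.false_ne_true hns

-- if the string has no separator at all, find returns -1
lemma pv_find_none (s : List Char) (c : Char) (hc : pvNonSep c = false)
    (hd : s.dropWhile pvNonSep = []) : PySem.Chars.find s [c] = -1 := by
  rw [PySem.Chars.find_eq_neg_one_iff]
  intro hinfix
  have hmem : c ∈ s := by
    obtain ⟨pre, post, hsp⟩ := hinfix
    rw [← hsp]; simp
  have : c ∈ s.takeWhile pvNonSep := by
    have hsplit : s.takeWhile pvNonSep ++ s.dropWhile pvNonSep = s := List.takeWhile_append_dropWhile
    rw [← hsplit] at hmem
    simpa [hd] using hmem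
  have := List.mem_takeWhile_imp this
  rw [hc] at this
  exact Bool.false_ne_true this

-- membership in the prefix set is membership in A's prefix list
lemma pv_set_eq_list (x : String) :
    PySem.Set.contains pvPrefixSet x = true ↔ x ∈ pvPrefixes := by
  unfold pvPrefixSet pvPrefixes
  constructor
  · intro h
    simp [PySem.Set.contains] at h
    rcases h with h | h <;> simp [h]
  · intro h
    simp at h
    simp [PySem.Set.contains]
    rcases h with h | h <;> simp [h]

-- ===== VERDICT (by name: the statement is the Claim_ definition above) =====
theorem infer_shape_py_spec : Claim_equal_infer_shape_py := by
  intro part_number fallback _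
  unfold Spec_infer_shape_py infer_shape_py infer_shape_py_alt
  dsimp only
  set s := PySem.Chars.upper (PySem.Chars.strip part_number.toList) with hs
  rw [pv_loopA_spec s fallback pvPrefixes (by decide)]
  set n := (s.takeWhile pvNonSep).length with hn
  by_cases hsep : s.dropWhile pvNonSep = []
  · -- no separator: A falls through; B's finds are both -1, cut = -1
    have hi := pv_find_none s ' ' (by decide) hsep
    have hj := pv_find_none s '-' (by decide) hsep
    rw [hi, hj, if_pos (show (-1 : Int) < 0 by norm_num),
        if_pos (show (-1 : Int) < 0 by norm_num), if_neg (by tauto)]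
  · -- a separator exists: its head c is ' ' or '-'; B's cut is n
    obtain ⟨c, hc⟩ : ∃ c, (s.dropWhile pvNonSep).head? = some c := by
      cases hd : s.dropWhile pvNonSep with
      | nil => exact absurd hd hsep
      | cons x xs => exact ⟨x, rfl⟩
    have hns := pv_head?_dropWhile pvNonSep s c hc
    have hcut : (if PySem.Chars.find s [' '] < 0 then PySem.Chars.find s ['-']
                 else if PySem.Chars.find s ['-'] < 0 then PySem.Chars.find s [' ']
                 else min (PySem.Chars.find s [' ']) (PySem.Chars.find s ['-'])) = (n : Int) := by
      by_cases h' : c = ' '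
      · have hi : PySem.Chars.find s [' '] = (n : Int) := pv_find_at_sep s ' ' (h' ▸ hc)
        rw [hi]
        have : ¬ ((n : Int) < 0) := by omega
        rw [if_neg this]
        by_cases hj0 : PySem.Chars.find s ['-'] < 0
        · rw [if_pos hj0]
        · rw [if_neg hj0]
          have hge := pv_find_ge s '-' (by decide) (by omega)
          omega
      · have h'' : c = '-' := by simp [pvNonSep, h'] at hns; exact hns
        have hj : PySem.Chars.find s ['-'] = (n : Int) := pv_find_at_sep s '-' (h'' ▸ hc)
        by_cases hi0 : PySem.Chars.find s [' '] < 0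
        · rw [if_pos hi0, hj]
        · rw [if_neg hi0, hj]
          have : ¬ ((n : Int) < 0) := by omega
          rw [if_neg this]
          have hge := pv_find_ge s ' ' (by decide) (by omega)
          omega
    simp only [hcut]
    have hc0 : ¬ ((n : Int) < 0) := by omega
    rw [if_neg hc0]
    have hslice : PySem.List.slice s none (some (n : Int)) = s.takeWhile pvNonSep := by
      rw [PySem.List.slice_to_natCast]
      have h := List.takeWhile_append_dropWhile (p := pvNonSep) (l := s)
      calc s.take (s.takeWhile pvNonSep).length
          = (s.takeWhile pvNonSep ++ s.dropWhile pvNonSep).take (s.takeWhile pvNonSep).length := by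
            rw [h]
        _ = s.takeWhile pvNonSep := List.take_left
    rw [hslice]
    by_cases hmem : String.ofList (s.takeWhile pvNonSep) ∈ pvPrefixes
    · rw [if_pos ⟨hsep, hmem⟩, if_pos ((pv_set_eq_list _).mpr hmem)]
    · rw [if_neg (by tauto), if_neg (fun h => hmem ((pv_set_eq_list _).mp h))]
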